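-- pv_equiv track=rewrite | github.com/facebookresearch/TaBERT | preprocess/common_crawl.py | are_mergeable
-- ===== SOURCE A (Python) =====
-- def are_mergeable(col1, col2):
--     assert len(col1) == len(col2)
--     merged = []
--     for i in range(len(col1)):
--         c1, c2 = col1[i], col2[i]
--         if not c1:
--             merged.append(c2)
--         elif not c2 or c1 == c2:
--             merged.append(c1)
--         else:
--             return None
--     return merged
-- ===== SOURCE B (Python) =====
-- def are_mergeable(col1, col2):
--     assert len(col1) == len(col2)
--     # pass 1: any conflict (both cells truthy and different) -> not mergeable
--     if any(a and b and a != b for a, b in zip(col1, col2)):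
--         return None
--     # pass 2: merged cell is the first truthy one (c1 if truthy else c2)
--     return [a or b for a, b in zip(col1, col2)]
-- ===== Notes on version B (the rewrite author's own statement) =====
-- stated objective: simpler
-- what changed: Replaces the interleaved build-and-early-return index loop with a two-pass decomposition over zip: first check for any conflicting pair, then build the merged list as [a or b].
import Mathlib
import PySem

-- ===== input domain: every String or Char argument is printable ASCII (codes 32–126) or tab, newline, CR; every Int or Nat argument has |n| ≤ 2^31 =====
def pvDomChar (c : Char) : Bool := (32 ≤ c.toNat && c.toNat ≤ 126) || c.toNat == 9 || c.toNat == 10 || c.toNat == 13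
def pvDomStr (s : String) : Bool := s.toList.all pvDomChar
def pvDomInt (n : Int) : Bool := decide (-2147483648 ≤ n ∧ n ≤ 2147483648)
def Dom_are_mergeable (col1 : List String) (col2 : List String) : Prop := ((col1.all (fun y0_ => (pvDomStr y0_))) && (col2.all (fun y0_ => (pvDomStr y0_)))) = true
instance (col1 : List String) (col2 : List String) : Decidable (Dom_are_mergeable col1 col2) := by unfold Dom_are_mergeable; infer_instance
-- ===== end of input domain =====

-- B replaces A's interleaved build-and-early-return index loop by a two-pass
-- decomposition (conflict check over zip, then build [a or b]); objective: simpler.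


-- ===== PORT A =====
-- the 'for i in range(len(col1))' loop with early 'return None'
def amLoop (col1 : List String) (col2 : List String) (i : Nat) (merged : List String) :
    Option (List String) :=
  if _h : i < col1.length then
    match PySem.List.pyGet? col1 (i : Int), PySem.List.pyGet? col2 (i : Int) with
    | some c1, some c2 =>
        if c1 = "" then amLoop col1 col2 (i + 1) (merged ++ [c2])
        else if c2 = "" ∨ c1 = c2 then amLoop col1 col2 (i + 1) (merged ++ [c1])
        else none
    | _, _ => none   -- IndexError (col2 shorter): excluded by Pre_ (assert fires first in Python)
  else some merged
termination_by col1.length - i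

def are_mergeable (col1 : List String) (col2 : List String) : Option (List String) :=
  amLoop col1 col2 0 []

-- ===== PORT B =====
-- 'a and b and a != b' on strings: truthy = nonempty
def bConflict (p : String × String) : Bool := p.1 ≠ "" && p.2 ≠ "" && p.1 ≠ p.2
-- 'a or b'
def bMerge (p : String × String) : String := if p.1 = "" then p.2 else p.1

def are_mergeable_alt (col1 : List String) (col2 : List String) : Option (List String) :=
  if (col1.zip col2).any bConflict then none
  else some ((col1.zip col2).map bMerge)

-- ===== PRECONDITION & SPEC =====
-- the assert: A raises AssertionError when the lengths differ
def Pre_are_mergeable (col1 : List String) (col2 : List String) : Prop :=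
  col1.length = col2.length
instance (col1 : List String) (col2 : List String) : Decidable (Pre_are_mergeable col1 col2) := by
  unfold Pre_are_mergeable; infer_instance

def pvWitness_are_mergeable : List String × List String := (["a", "", "x"], ["a", "b", ""])

def Spec_are_mergeable (col1 : List String) (col2 : List String) (out : Option (List String)) : Prop := out = are_mergeable_alt col1 col2
instance (col1 : List String) (col2 : List String) (out : Option (List String)) : Decidable (Spec_are_mergeable col1 col2 out) := by unfold Spec_are_mergeable; infer_instance

-- ===== CLAIM (what is proved, stated in full; the proofs are below) =====
def Claim_equal_are_mergeable : Prop := ∀ (col1 : List String) (col2 : List String), Dom_are_mergeable col1 col2 → Pre_are_mergeable col1 col2 → Spec_are_mergeable col1 col2 (are_mergeable col1 col2)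

-- ===== LEMMAS AND PROOFS =====
lemma amLoop_invariant (col1 col2 : List String) (hl : col1.length = col2.length) :
    ∀ n i merged, col1.length - i = n →
      amLoop col1 col2 i merged =
        (if ((col1.drop i).zip (col2.drop i)).any bConflict then none
         else some (merged ++ ((col1.drop i).zip (col2.drop i)).map bMerge)) := by
  intro n
  induction n with
  | zero =>
      intro i merged h
      have hge : col1.length ≤ i := by omega
      rw [amLoop]
      simp [Nat.not_lt.mpr hge, List.drop_eq_nil_of_le hge,
        List.drop_eq_nil_of_le (hl ▸ hge)]
  | succ n ih =>
      intro i merged h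
      have hi : i < col1.length := by omega
      have hi2 : i < col2.length := by omega
      have hd1 : col1.drop i = col1[i] :: col1.drop (i + 1) :=
        List.drop_eq_getElem_cons hi
      have hd2 : col2.drop i = col2[i] :: col2.drop (i + 1) :=
        List.drop_eq_getElem_cons hi2
      have hg1 : PySem.List.pyGet? col1 (i : Int) = some col1[i] := by
        simp [PySem.List.pyGet?, PySem.List.pyIdx?, hi]
      have hg2 : PySem.List.pyGet? col2 (i : Int) = some col2[i] := by
        simp [PySem.List.pyGet?, PySem.List.pyIdx?, hi2]
      rw [amLoop]
      simp only [hi, dif_pos, hg1, hg2, hd1, hd2, List.zip_cons_cons, List.any_cons,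
        List.map_cons]
      by_cases h1 : col1[i] = ""
      · rw [if_pos h1, ih (i + 1) (merged ++ [col2[i]]) (by omega)]
        have hm : bMerge (col1[i], col2[i]) = col2[i] := by simp [bMerge, h1]
        have hc : bConflict (col1[i], col2[i]) = false := by simp [bConflict, h1]
        rw [hm, hc, Bool.false_or, List.append_assoc]; rfl
      · rw [if_neg h1]
        by_cases h2 : col2[i] = "" ∨ col1[i] = col2[i]
        · rw [if_pos h2, ih (i + 1) (merged ++ [col1[i]]) (by omega)]
          have hc : bConflict (col1[i], col2[i]) = false := by
            simp [bConflict]; rcases h2 with h2 | h2 <;> simp [h1, h2]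
          have hm : bMerge (col1[i], col2[i]) = col1[i] := by
            simp [bMerge, h1]
          rw [hc, hm, Bool.false_or, List.append_assoc]; rfl
        · rw [if_neg h2]
          push Not at h2
          have hc : bConflict (col1[i], col2[i]) = true := by
            simp [bConflict, h1, h2.1, h2.2]
          simp [hc]

-- ===== VERDICT (by name: the statement is the Claim_ definition above) =====
theorem are_mergeable_spec : Claim_equal_are_mergeable := by
  intro col1 col2 _ hpre
  unfold Spec_are_mergeable are_mergeable are_mergeable_alt
  rw [amLoop_invariant col1 col2 hpre (col1.length - 0) 0 [] rfl]
  simp
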